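-- pv_equiv track=rewrite | github.com/MrBrantCode/unitest_baseline | mut_generate/mist_train_taco/taco_2801/solution.py | count_restoration_ways
-- ===== SOURCE A (Python) =====
-- def count_restoration_ways(n, words):
--     MOD = 10**9 + 7
--     M = 20
--     L = 26
--     ca = ord('a')
--     cq = ord('?')
--
--     # Initialize the 2D list S with ord('a') - 1
--     S = [[ca - 1] * M for _ in range(n)]
--
--     # Fill S with the ord values of the characters in the words
--     for i in range(n):
--         s = words[i]
--         S[i][:len(s)] = map(ord, s)
--
--     # Initialize the memoization table
--     memo = [[[[-1] * (L + 2) for _ in range(M + 1)] for _ in range(n + 1)] for _ in range(n + 1)]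
--
--     # Base cases for memoization table
--     for i in range(n + 1):
--         for p in range(M + 1):
--             for c in range(L + 2):
--                 memo[i][i][p][c] = 1
--
--     for i in range(n + 1):
--         for j in range(i + 1, n + 1):
--             for p in range(M + 1):
--                 memo[i][j][p][L + 1] = 0
--             for c in range(L + 2):
--                 memo[i][j][M][c] = i + 1 == j
--
--     # Depth-first search function to fill the memoization table
--     def dfs(l, r, p, c):
--         if memo[l][r][p][c] != -1:
--             return memo[l][r][p][c]
--         res = dfs(l, r, p, c + 1)
--         for i in range(l + 1, r + 1):
--             if S[i - 1][p] != ca + c - 1 if S[i - 1][p] != cq else c == 0: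
--                 break
--             res += dfs(l, i, p + 1, 0) * dfs(i, r, p, c + 1) % MOD
--         memo[l][r][p][c] = res = res % MOD
--         return res
--
--     # Return the result of the dfs function
--     return dfs(0, n, 0, 0)
-- ===== SOURCE B (Python) =====
-- def count_restoration_ways(n, words):
--     # Bottom-up: fill the same DP table explicitly (dict keyed by state), in
--     # increasing interval length; base cases are computed on the fly by `lookup`
--     # instead of being prefilled into a 4-D array.
--     MOD = 10**9 + 7
--     M = 20
--     L = 26
--     ca = ord('a')
--     cq = ord('?')
--     T = {}
--
--     def code(i, p):
--         s = words[i - 1]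
--         return ord(s[p]) if p < len(s) else ca - 1
--
--     def lookup(l, r, p, c):
--         if l == r:
--             return 1
--         if p == M:
--             return 1 if l + 1 == r else 0
--         if c == L + 1:
--             return 0
--         return T[(l, r, p, c)]
--
--     for d in range(1, n + 1):
--         for l in range(0, n + 1 - d):
--             r = l + d
--             for p in range(M - 1, -1, -1):
--                 for c in range(L, -1, -1):
--                     res = lookup(l, r, p, c + 1)
--                     for i in range(l + 1, r + 1):
--                         ch = code(i, p)
--                         if (ch != ca + c - 1) if ch != cq else (c == 0):
--                             break
--                         res += lookup(l, i, p + 1, 0) * lookup(i, r, p, c + 1) % MOD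
--                     T[(l, r, p, c)] = res % MOD
--     return lookup(0, n, 0, 0)
-- ===== Notes on version B (the rewrite author's own statement) =====
-- stated objective: alternative
-- what changed: Replaces the memoized recursive DFS over the 4-D table by an explicit bottom-up fill in increasing interval length (p and c descending), with base cases computed on the fly by a small lookup helper instead of a prefilled 4-D array of sentinels.
import Mathlib
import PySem

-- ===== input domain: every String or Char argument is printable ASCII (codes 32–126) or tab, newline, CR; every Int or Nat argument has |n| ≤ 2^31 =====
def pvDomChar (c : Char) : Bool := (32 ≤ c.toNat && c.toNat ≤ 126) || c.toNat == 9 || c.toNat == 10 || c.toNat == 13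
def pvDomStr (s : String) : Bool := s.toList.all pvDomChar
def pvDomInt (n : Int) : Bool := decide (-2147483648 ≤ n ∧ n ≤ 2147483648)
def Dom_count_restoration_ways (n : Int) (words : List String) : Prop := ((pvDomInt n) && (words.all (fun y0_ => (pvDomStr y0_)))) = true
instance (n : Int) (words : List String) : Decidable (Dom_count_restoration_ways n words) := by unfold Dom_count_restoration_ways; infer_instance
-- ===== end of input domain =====

-- B replaces A's memoized recursive DFS by an explicit bottom-up fill of the same DP table
-- (alternative decomposition, same asymptotic cost); equivalence proved on 0 ≤ n ≤ len(words).

-- ===== PORT A =====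
-- row of A's matrix S: the ord codes of the word followed by the untouched ord('a')-1 = 96 fillers
-- (exactly Python's S[i] after the slice assignment, for any word length)
def pvRowA (s : String) : List Int :=
  s.toList.map (fun ch => (ch.toNat : Int)) ++ List.replicate (20 - s.length) 96

-- A's memo is a prefilled 4-D array of -1 sentinels plus base entries; the port keeps it as a
-- dict holding exactly the non-(-1) entries (get? = none ↔ entry still -1; stored values are
-- never -1), built by the same three base-case loop nests.
def pvBaseA (N : Nat) : PySem.Dict (Int × Int × Int × Int) Int :=
  let T1 := (List.range (N+1)).foldl (fun T (i : Nat) =>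
    (List.range 21).foldl (fun T (p : Nat) =>
      (List.range 28).foldl (fun T (c : Nat) =>
        T.insert ((i : Int), (i : Int), (p : Int), (c : Int)) 1) T) T) PySem.Dict.empty
  (List.range (N+1)).foldl (fun T (i : Nat) =>
    (List.range' (i+1) (N - i)).foldl (fun T (j : Nat) =>
      let T := (List.range 21).foldl (fun T (p : Nat) =>
        T.insert ((i : Int), (j : Int), (p : Int), 27) 0) T
      (List.range 28).foldl (fun T (c : Nat) =>
        T.insert ((i : Int), (j : Int), 20, (c : Int)) (if i + 1 = j then 1 else 0)) T) T) T1

-- dfs of A, with the memo dict threaded through; `fuel` is only a totality guard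
-- (proved sufficient at the call site), every step mirrors Python's dfs.
mutual
def pvDfsA (S : List (List Int)) (fuel : Nat) (T : PySem.Dict (Int × Int × Int × Int) Int)
    (l r p c : Nat) : Int × PySem.Dict (Int × Int × Int × Int) Int :=
  match fuel with
  | 0 => (0, T)   -- never reached: fuel is chosen larger than the recursion depth
  | fuel + 1 =>
    match T.get? ((l : Int), (r : Int), (p : Int), (c : Int)) with
    | some v => (v, T)              -- memo[l][r][p][c] != -1
    | none =>
      let rt := pvDfsA S fuel T l r p (c+1)
      let lt := pvLoopA S fuel rt.2 l r p c (l+1) rt.1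
      let v := PySem.Int.mod lt.1 1000000007
      (v, lt.2.insert ((l : Int), (r : Int), (p : Int), (c : Int)) v)
termination_by (fuel, 0)
decreasing_by all_goals (first | omega | (simp_wf; simp [Prod.lex_def]; try omega))

-- the `for i in range(l+1, r+1)` loop of dfs, with its break
def pvLoopA (S : List (List Int)) (fuel : Nat) (T : PySem.Dict (Int × Int × Int × Int) Int)
    (l r p c i : Nat) (res : Int) : Int × PySem.Dict (Int × Int × Int × Int) Int :=
  if _h : l < i ∧ i ≤ r then
    let ch := (S.getD (i-1) []).getD p 96
    if (if ch ≠ 63 then ch ≠ 96 + (c : Int) else c = 0) then (res, T)   -- break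
    else
      let a := pvDfsA S fuel T l i (p+1) 0
      let b := pvDfsA S fuel a.2 i r p (c+1)
      pvLoopA S fuel b.2 l r p c (i+1) (res + PySem.Int.mod (a.1 * b.1) 1000000007)
  else (res, T)
termination_by (fuel, r + 1 - i)
decreasing_by all_goals (first | omega | (simp_wf; simp [Prod.lex_def]; try omega))
end

def count_restoration_ways (n : Int) (words : List String) : Int :=
  let N := n.toNat
  let S := (List.range N).map (fun i => pvRowA (words.getD i ""))
  (pvDfsA S (588 * N + 588) (pvBaseA N) 0 N 0 0).1

-- ===== PORT B =====
-- code(i, p) of Source B (s[p] is total here because p < len(s) is checked first)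
def pvCodeB (words : List String) (i p : Nat) : Int :=
  let s := words.getD (i-1) ""
  if p < s.length then ((s.toList.getD p ' ').toNat : Int) else 96

-- lookup of Source B; at every call site the key is present (proved), so getD 0 is exact
def pvLookupB (T : PySem.Dict (Int × Int × Int × Int) Int) (l r p c : Nat) : Int :=
  if l = r then 1
  else if p = 20 then (if l + 1 = r then 1 else 0)
  else if c = 27 then 0
  else (T.get? ((l : Int), (r : Int), (p : Int), (c : Int))).getD 0

-- the inner `for i in range(l+1, r+1)` loop of Source B, with its break
def pvInnerB (words : List String) (T : PySem.Dict (Int × Int × Int × Int) Int)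
    (l r p c i : Nat) (res : Int) : Int :=
  if _h : l < i ∧ i ≤ r then
    let ch := pvCodeB words i p
    if (if ch ≠ 63 then ch ≠ 96 + (c : Int) else c = 0) then res
    else pvInnerB words T l r p c (i+1)
          (res + PySem.Int.mod (pvLookupB T l i (p+1) 0 * pvLookupB T i r p (c+1)) 1000000007)
  else res
termination_by r + 1 - i
decreasing_by simp_wf; omega

-- `for c in range(L, -1, -1)`
def pvFillC (words : List String) (T : PySem.Dict (Int × Int × Int × Int) Int)
    (l r p c : Nat) : PySem.Dict (Int × Int × Int × Int) Int :=
  let res := pvInnerB words T l r p c (l+1) (pvLookupB T l r p (c+1))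
  let T' := T.insert ((l : Int), (r : Int), (p : Int), (c : Int)) (PySem.Int.mod res 1000000007)
  if c = 0 then T' else pvFillC words T' l r p (c-1)
termination_by c
decreasing_by omega

-- `for p in range(M-1, -1, -1)`
def pvFillP (words : List String) (T : PySem.Dict (Int × Int × Int × Int) Int)
    (l r p : Nat) : PySem.Dict (Int × Int × Int × Int) Int :=
  let T' := pvFillC words T l r p 26
  if p = 0 then T' else pvFillP words T' l r (p-1)
termination_by p
decreasing_by omega

-- `for l in range(0, n + 1 - d)` (r = l + d)
def pvFillL (words : List String) (T : PySem.Dict (Int × Int × Int × Int) Int)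
    (d l stop : Nat) : PySem.Dict (Int × Int × Int × Int) Int :=
  if h : l < stop then pvFillL words (pvFillP words T l (l + d) 19) d (l+1) stop else T
termination_by stop - l
decreasing_by omega

-- `for d in range(1, n + 1)`
def pvFillD (words : List String) (T : PySem.Dict (Int × Int × Int × Int) Int)
    (d N : Nat) : PySem.Dict (Int × Int × Int × Int) Int :=
  if h : d ≤ N then pvFillD words (pvFillL words T d 0 (N + 1 - d)) (d+1) N else T
termination_by N + 1 - d
decreasing_by omega

def count_restoration_ways_alt (n : Int) (words : List String) : Int :=
  let N := n.toNat
  let T := pvFillD words PySem.Dict.empty 1 N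
  pvLookupB T 0 N 0 0

-- ===== PRECONDITION & SPEC =====
-- Pre_ excludes exactly the inputs on which A raises (IndexError: n < 0 or n > len(words)).
def Pre_count_restoration_ways (n : Int) (words : List String) : Prop :=
  0 ≤ n ∧ n ≤ (words.length : Int)
instance (n : Int) (words : List String) : Decidable (Pre_count_restoration_ways n words) := by
  unfold Pre_count_restoration_ways; infer_instance

def pvWitness_count_restoration_ways : Int × List String := (2, ["ab", "a?"])

def Spec_count_restoration_ways (n : Int) (words : List String) (out : Int) : Prop :=
  out = count_restoration_ways_alt n words
instance (n : Int) (words : List String) (out : Int) :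
    Decidable (Spec_count_restoration_ways n words out) := by
  unfold Spec_count_restoration_ways; infer_instance

-- ===== CLAIM (what is proved, stated in full; the proofs are below) =====
def Claim_equal_count_restoration_ways : Prop :=
  ∀ (n : Int) (words : List String), Dom_count_restoration_ways n words →
    Pre_count_restoration_ways n words →
    Spec_count_restoration_ways n words (count_restoration_ways n words)

-- ===== LEMMAS AND PROOFS =====

-- the common mathematical value of both programs: the plain (unmemoized) recurrence
mutual
def pvG (code : Nat → Nat → Int) (l r p c : Nat) : Int :=
  if l = r then 1
  else if 20 ≤ p then (if l + 1 = r then 1 else 0)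
  else if 27 ≤ c then 0
  else PySem.Int.mod (pvGloop code l r p c (l+1) (pvG code l r p (c+1))) 1000000007
termination_by (r - l, 20 - p, 27 - c, 1, 0)
decreasing_by all_goals (first | omega | (simp_wf; simp [Prod.lex_def]; try omega))

def pvGloop (code : Nat → Nat → Int) (l r p c i : Nat) (res : Int) : Int :=
  if _h : l < i ∧ i ≤ r ∧ p < 20 then
    let ch := code i p
    if (if ch ≠ 63 then ch ≠ 96 + (c : Int) else c = 0) then res
    else pvGloop code l r p c (i+1)
          (res + PySem.Int.mod (pvG code l i (p+1) 0 * pvG code i r p (c+1)) 1000000007)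
  else res
termination_by (r - l, 20 - p, 27 - c, 0, r + 1 - i)
decreasing_by all_goals (first | omega | (simp_wf; simp [Prod.lex_def]; try omega))
end


-- ---------- keys ----------
def pvKey (l r p c : Nat) : Int × Int × Int × Int := ((l : Int), (r : Int), (p : Int), (c : Int))

theorem pvKey_eq_iff (l r p c l' r' p' c' : Nat) :
    pvKey l r p c = pvKey l' r' p' c' ↔ (l = l' ∧ r = r' ∧ p = p' ∧ c = c') := by
  simp [pvKey, Prod.ext_iff]

-- ---------- generic characterization of an insert-per-element fold ----------
theorem pv_get?_foldl_of_pred {α K V : Type} [BEq K] [LawfulBEq K]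
    (xs : List α) (F : PySem.Dict K V → α → PySem.Dict K V)
    (P : α → K → Bool) (v : K → V)
    (hF : ∀ T a x, ((F T a).get? x) = if P a x then some (v x) else T.get? x) :
    ∀ (T : PySem.Dict K V) (x : K),
      (xs.foldl F T).get? x = if xs.any (fun a => P a x) then some (v x) else T.get? x := by
  induction xs with
  | nil => intro T x; simp
  | cons a xs ih =>
    intro T x
    simp only [List.foldl_cons, List.any_cons]
    rw [ih, hF]
    by_cases h1 : xs.any (fun a => P a x) <;> by_cases h2 : P a x <;> simp [h1, h2]

-- ---------- characterization of A's prefilled base table ----------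
def pvVOff (x : Int × Int × Int × Int) : Int :=
  if x.2.2.1 = 20 then (if x.1 + 1 = x.2.1 then 1 else 0) else 0

def pvPDiag (N : Nat) (x : Int × Int × Int × Int) : Bool :=
  (List.range (N+1)).any fun i => (List.range 21).any fun p => (List.range 28).any fun c =>
    x = pvKey i i p c

def pvPBody (i j : Nat) (x : Int × Int × Int × Int) : Bool :=
  ((List.range 28).any fun c => x = pvKey i j 20 c) ||
  ((List.range 21).any fun p => x = pvKey i j p 27)

def pvPOff (N : Nat) (x : Int × Int × Int × Int) : Bool :=
  (List.range (N+1)).any fun i => (List.range' (i+1) (N - i)).any fun j => pvPBody i j x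

theorem pv_insert_char {V : Type} (T : PySem.Dict (Int × Int × Int × Int) V)
    (k x : Int × Int × Int × Int) (v : V) :
    (T.insert k v).get? x = if (x = k : Bool) then some v else T.get? x := by
  rw [PySem.Dict.get?_insert]
  by_cases h : x = k <;> simp [h]

theorem pv_diag_char (N : Nat) (T : PySem.Dict (Int × Int × Int × Int) Int)
    (x : Int × Int × Int × Int) :
    ((List.range (N+1)).foldl (fun T (i : Nat) =>
      (List.range 21).foldl (fun T (p : Nat) =>
        (List.range 28).foldl (fun T (c : Nat) =>
          T.insert ((i : Int), (i : Int), (p : Int), (c : Int)) 1) T) T) T).get? x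
    = if pvPDiag N x then some 1 else T.get? x := by
  rw [pv_get?_foldl_of_pred (List.range (N+1)) _
      (fun i x => (List.range 21).any fun p => (List.range 28).any fun c => x = pvKey i i p c)
      (fun _ => 1)]
  · rfl
  · intro T i x
    rw [pv_get?_foldl_of_pred (List.range 21) _
        (fun p x => (List.range 28).any fun c => x = pvKey i i p c) (fun _ => 1)]
    intro T p x
    rw [pv_get?_foldl_of_pred (List.range 28) _
        (fun c x => x = pvKey i i p c) (fun _ => 1)]
    intro T c x
    exact pv_insert_char T _ x 1

theorem pv_body_char (i j : Nat) (T : PySem.Dict (Int × Int × Int × Int) Int)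
    (x : Int × Int × Int × Int) :
    ((List.range 28).foldl (fun T (c : Nat) =>
        T.insert ((i : Int), (j : Int), 20, (c : Int)) (if i + 1 = j then 1 else 0))
      ((List.range 21).foldl (fun T (p : Nat) =>
        T.insert ((i : Int), (j : Int), (p : Int), 27) 0) T)).get? x
    = if pvPBody i j x then some (pvVOff x) else T.get? x := by
  rw [pv_get?_foldl_of_pred (List.range 28) _
      (fun c x => x = pvKey i j 20 c) (fun x => if x.1 + 1 = x.2.1 then 1 else 0)]
  · rw [pv_get?_foldl_of_pred (List.range 21) _
        (fun p x => x = pvKey i j p 27) (fun _ => 0)]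
    · by_cases h2 : (List.range 28).any fun c => x = pvKey i j 20 c
      · have hb : pvPBody i j x := by simp only [pvPBody, h2, Bool.true_or]
        rw [if_pos h2, if_pos hb]
        simp only [List.any_eq_true, decide_eq_true_eq] at h2
        obtain ⟨c, _, rfl⟩ := h2
        simp [pvKey, pvVOff]
      · by_cases h1 : (List.range 21).any fun p => x = pvKey i j p 27
        · have hb : pvPBody i j x := by simp only [pvPBody, h1, Bool.or_true]
          rw [if_neg (by simp [h2]), if_pos h1, if_pos hb]
          simp only [List.any_eq_true, decide_eq_true_eq] at h1 h2
          obtain ⟨p, hp, rfl⟩ := h1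
          have hne : ¬ ((pvKey i j p 27).2.2.1 = 20) := by
            intro hk
            have hp20 : p = 20 := by
              have : ((p : Int)) = 20 := hk
              exact_mod_cast this
            exact h2 ⟨27, by simp, by rw [hp20]⟩
          simp [pvVOff, hne]
        · have hb : ¬ (pvPBody i j x = true) := by
            simp only [pvPBody, Bool.or_eq_true]
            rintro (h | h)
            exacts [h2 h, h1 h]
          rw [if_neg (by simp [h2]), if_neg (by simp [h1]), if_neg hb]
    · intro T p x
      exact pv_insert_char T _ x 0
  · intro T c x
    rw [pv_insert_char]
    have hk : pvKey i j 20 c = ((i : Int), (j : Int), 20, (c : Int)) := by simp [pvKey]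
    rw [hk]
    by_cases h : x = ((i : Int), (j : Int), 20, (c : Int))
    · subst h
      simp only [decide_true, if_pos]
      by_cases hij : i + 1 = j
      · have : ((i : Int) + 1 = (j : Int)) := by omega
        simp [hij, this]
      · have : ¬ ((i : Int) + 1 = (j : Int)) := by omega
        simp [hij, this]
    · simp [h]

theorem pvBaseA_char (N : Nat) (x : Int × Int × Int × Int) :
    (pvBaseA N).get? x
    = if pvPOff N x then some (pvVOff x)
      else if pvPDiag N x then some 1 else none := by
  unfold pvBaseA
  rw [pv_get?_foldl_of_pred (List.range (N+1)) _
      (fun i x => (List.range' (i+1) (N - i)).any fun j => pvPBody i j x) pvVOff]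
  · rw [pv_diag_char]
    simp only [pvPOff, PySem.Dict.get?_empty]
    rfl
  · intro T i x
    rw [pv_get?_foldl_of_pred (List.range' (i+1) (N - i)) _
        (fun j x => pvPBody i j x) pvVOff]
    intro T j x
    exact pv_body_char i j T x

-- ---------- g at base states ----------
theorem pvG_diag (code : Nat → Nat → Int) (l r p c : Nat) (h : l = r) :
    pvG code l r p c = 1 := by rw [pvG]; simp [h]

theorem pvG_row (code : Nat → Nat → Int) (l r p c : Nat) (hlr : l ≠ r) (hp : 20 ≤ p) :
    pvG code l r p c = if l + 1 = r then 1 else 0 := by rw [pvG]; simp [hlr, hp]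

theorem pvG_col (code : Nat → Nat → Int) (l r p c : Nat) (hlr : l ≠ r) (hp : p < 20)
    (hc : 27 ≤ c) : pvG code l r p c = 0 := by
  rw [pvG]; simp [hlr, hc]; omega

theorem pvG_step (code : Nat → Nat → Int) (l r p c : Nat) (hlr : l ≠ r) (hp : p < 20)
    (hc : c < 27) :
    pvG code l r p c
      = PySem.Int.mod (pvGloop code l r p c (l+1) (pvG code l r p (c+1))) 1000000007 := by
  rw [pvG]
  simp only [if_neg hlr]
  rw [if_neg (by omega), if_neg (by omega)]

-- ---------- the base-table predicates at a quadruple of casts ----------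
theorem pvPDiag_key (N l r p c : Nat) :
    pvPDiag N (pvKey l r p c) = true ↔ (l = r ∧ l ≤ N ∧ p ≤ 20 ∧ c ≤ 27) := by
  simp only [pvPDiag, List.any_eq_true, List.mem_range, decide_eq_true_eq, pvKey,
    Prod.mk.injEq, Int.natCast_inj]
  constructor
  · rintro ⟨i, hi, p', hp', c', hc', h1, h2, h3, h4⟩; omega
  · rintro ⟨rfl, hl, hp, hc⟩; exact ⟨l, by omega, p, by omega, c, by omega, rfl, rfl, rfl, rfl⟩

theorem pvPOff_key (N l r p c : Nat) :
    pvPOff N (pvKey l r p c) = true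
      ↔ (l < r ∧ r ≤ N ∧ ((p = 20 ∧ c ≤ 27) ∨ (p ≤ 20 ∧ c = 27))) := by
  simp only [pvPOff, pvPBody, List.any_eq_true, List.mem_range, List.mem_range'_1,
    Bool.or_eq_true, decide_eq_true_eq, pvKey, Prod.mk.injEq, Int.natCast_inj]
  constructor
  · rintro ⟨i, hi, j, hj, (⟨c', hc', h1, h2, h3, h4⟩ | ⟨p', hp', h1, h2, h3, h4⟩)⟩
    · have : ((p : Int)) = ((20 : Nat) : Int) := by exact_mod_cast h3
      omega
    · have : ((c : Int)) = ((27 : Nat) : Int) := by exact_mod_cast h4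
      omega
  · rintro ⟨hlr, hr, (⟨rfl, hc⟩ | ⟨hp, rfl⟩)⟩
    · exact ⟨l, by omega, r, by omega, Or.inl ⟨c, by omega, rfl, rfl, by norm_num, rfl⟩⟩
    · exact ⟨l, by omega, r, by omega, Or.inr ⟨p, by omega, rfl, rfl, rfl, by norm_num⟩⟩

theorem pvVOff_key (l r p c : Nat) :
    pvVOff (pvKey l r p c) = if p = 20 then (if l + 1 = r then 1 else 0) else 0 := by
  simp only [pvVOff, pvKey]
  by_cases hp : p = 20
  · rw [if_pos (by exact_mod_cast hp), if_pos hp]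
    by_cases hlr : l + 1 = r
    · rw [if_pos (by exact_mod_cast hlr), if_pos hlr]
    · rw [if_neg (by exact_mod_cast hlr), if_neg hlr]
  · rw [if_neg (by exact_mod_cast hp), if_neg hp]

-- ---------- invariants of A's memo dict ----------
def pvHcorr (words : List String) (T : PySem.Dict (Int × Int × Int × Int) Int) : Prop :=
  ∀ l r p c : Nat, ∀ v : Int,
    T.get? (pvKey l r p c) = some v → v = pvG (pvCodeB words) l r p c

def pvHbase (N : Nat) (words : List String) (T : PySem.Dict (Int × Int × Int × Int) Int) : Prop :=
  ∀ l r p c : Nat, l ≤ r → r ≤ N → p ≤ 20 → c ≤ 27 → (l = r ∨ p = 20 ∨ c = 27) →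
    T.get? (pvKey l r p c) = some (pvG (pvCodeB words) l r p c)

theorem pvBaseA_Hcorr (N : Nat) (words : List String) : pvHcorr words (pvBaseA N) := by
  intro l r p c v h
  rw [pvBaseA_char] at h
  by_cases hoff : pvPOff N (pvKey l r p c)
  · rw [if_pos hoff] at h
    obtain ⟨hlr, hr, hpc⟩ := (pvPOff_key N l r p c).1 hoff
    have hv : v = pvVOff (pvKey l r p c) := by exact (Option.some_inj.1 h).symm
    rw [hv, pvVOff_key]
    rcases hpc with ⟨hp, hc⟩ | ⟨hp, hc⟩
    · rw [if_pos hp, pvG_row _ _ _ _ _ (by omega) (by omega)]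
    · by_cases hp20 : p = 20
      · rw [if_pos hp20, pvG_row _ _ _ _ _ (by omega) (by omega)]
      · rw [if_neg hp20, pvG_col _ _ _ _ _ (by omega) (by omega) (by omega)]
  · rw [if_neg hoff] at h
    by_cases hd : pvPDiag N (pvKey l r p c)
    · rw [if_pos hd] at h
      obtain ⟨hlr2, _, _, _⟩ := (pvPDiag_key N l r p c).1 hd
      rw [pvG_diag _ _ _ _ _ hlr2]
      exact (Option.some_inj.1 h).symm
    · rw [if_neg hd] at h; exact absurd h (by simp)

theorem pvBaseA_Hbase (N : Nat) (words : List String) : pvHbase N words (pvBaseA N) := by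
  intro l r p c hlr hr hp hc hbase
  rw [pvBaseA_char]
  by_cases hoff : pvPOff N (pvKey l r p c)
  · rw [if_pos hoff]
    obtain ⟨hlr', _, hpc⟩ := (pvPOff_key N l r p c).1 hoff
    rw [pvVOff_key]
    rcases hpc with ⟨hp20, _⟩ | ⟨_, hc27⟩
    · rw [if_pos hp20, pvG_row _ _ _ _ _ (by omega) (by omega)]
    · by_cases hp20 : p = 20
      · rw [if_pos hp20, pvG_row _ _ _ _ _ (by omega) (by omega)]
      · rw [if_neg hp20, pvG_col _ _ _ _ _ (by omega) (by omega) (by omega)]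
  · rw [if_neg hoff]
    have hd : pvPDiag N (pvKey l r p c) = true := by
      rw [pvPDiag_key]
      by_cases hlr2 : l = r
      · exact ⟨hlr2, by omega, hp, hc⟩
      · exfalso
        rcases hbase with h | h | h
        · exact hlr2 h
        · exact hoff ((pvPOff_key N l r p c).2 ⟨by omega, hr, Or.inl ⟨h, hc⟩⟩)
        · exact hoff ((pvPOff_key N l r p c).2 ⟨by omega, hr, Or.inr ⟨hp, h⟩⟩)
    rw [if_pos hd]
    obtain ⟨rfl, _, _, _⟩ := (pvPDiag_key N l r p c).1 hd
    rw [pvG_diag _ _ _ _ _ rfl]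

-- ---------- S-row access of A = code of B ----------
def pvSA (N : Nat) (words : List String) : List (List Int) :=
  (List.range N).map (fun i => pvRowA (words.getD i ""))

theorem pvRowA_getD (s : String) (p : Nat) :
    (pvRowA s).getD p 96 = if p < s.length then ((s.toList.getD p ' ').toNat : Int) else 96 := by
  have hlen : s.toList.length = s.length := s.length_toList
  unfold pvRowA
  by_cases h : p < s.length
  · rw [if_pos h, List.getD_eq_getElem?_getD, List.getD_eq_getElem?_getD]
    rw [List.getElem?_append_left (by simp [hlen]; omega)]
    have hp : p < s.toList.length := by omega
    rw [List.getElem?_map, List.getElem?_eq_getElem hp]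
    simp
  · rw [if_neg h, List.getD_eq_getElem?_getD]
    rw [List.getElem?_append_right (by simp [hlen]; omega)]
    rw [List.getElem?_replicate]
    simp only [List.length_map, hlen]
    split <;> simp

theorem pvS_access (N : Nat) (words : List String) (i p : Nat) (h1 : 1 ≤ i) (h2 : i ≤ N) :
    (((pvSA N words).getD (i-1) []).getD p 96) = pvCodeB words i p := by
  unfold pvSA pvCodeB
  have hi : i - 1 < N := by omega
  have hmap : ((List.range N).map (fun j => pvRowA (words.getD j ""))).getD (i-1) []
      = pvRowA (words.getD (i-1) "") := by
    rw [List.getD_eq_getElem?_getD, List.getElem?_map, List.getElem?_range hi]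
    rfl
  rw [hmap, pvRowA_getD]

-- ---------- invariant preservation ----------
theorem pvHcorr_insert (words : List String) (T : PySem.Dict (Int × Int × Int × Int) Int)
    (l r p c : Nat) (h : pvHcorr words T) :
    pvHcorr words (T.insert (pvKey l r p c) (pvG (pvCodeB words) l r p c)) := by
  intro l' r' p' c' v hv
  rw [PySem.Dict.get?_insert] at hv
  by_cases hk : pvKey l' r' p' c' = pvKey l r p c
  · rw [if_pos hk] at hv
    obtain ⟨rfl, rfl, rfl, rfl⟩ := (pvKey_eq_iff l' r' p' c' l r p c).1 hk
    exact (Option.some_inj.1 hv).symm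
  · rw [if_neg hk] at hv
    exact h _ _ _ _ _ hv

theorem pvHbase_insert (N : Nat) (words : List String)
    (T : PySem.Dict (Int × Int × Int × Int) Int) (l r p c : Nat) (v : Int)
    (hb : pvHbase N words T) (hnb : ¬ (l = r ∨ p = 20 ∨ c = 27)) :
    pvHbase N words (T.insert (pvKey l r p c) v) := by
  intro l' r' p' c' h1 h2 h3 h4 h5
  rw [PySem.Dict.get?_insert]
  by_cases hk : pvKey l' r' p' c' = pvKey l r p c
  · obtain ⟨rfl, rfl, rfl, rfl⟩ := (pvKey_eq_iff l' r' p' c' l r p c).1 hk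
    exact absurd h5 hnb
  · rw [if_neg hk]
    exact hb l' r' p' c' h1 h2 h3 h4 h5

-- ---------- correctness of A's memoized dfs ----------
def pvRank (l r p c : Nat) : Nat := (r - l) * 588 + (20 - p) * 28 + (27 - c)

def pvAOK (N : Nat) (words : List String) (fuel : Nat) : Prop :=
  ∀ (T : PySem.Dict (Int × Int × Int × Int) Int) (l r p c : Nat),
    pvRank l r p c < fuel → l ≤ r → r ≤ N → p ≤ 20 → c ≤ 27 →
    pvHbase N words T → pvHcorr words T →
    (pvDfsA (pvSA N words) fuel T l r p c).1 = pvG (pvCodeB words) l r p c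
    ∧ pvHbase N words (pvDfsA (pvSA N words) fuel T l r p c).2
    ∧ pvHcorr words (pvDfsA (pvSA N words) fuel T l r p c).2

theorem pvLoopA_correct (N : Nat) (words : List String) (fuel : Nat)
    (hdfs : pvAOK N words fuel) :
    ∀ (k i : Nat) (T : PySem.Dict (Int × Int × Int × Int) Int) (res : Int) (l r p c : Nat),
      r + 1 - i = k → pvRank l r p c ≤ fuel → l < r → r ≤ N → p < 20 → c < 27 →
      pvHbase N words T → pvHcorr words T →
      (pvLoopA (pvSA N words) fuel T l r p c i res).1 = pvGloop (pvCodeB words) l r p c i res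
      ∧ pvHbase N words (pvLoopA (pvSA N words) fuel T l r p c i res).2
      ∧ pvHcorr words (pvLoopA (pvSA N words) fuel T l r p c i res).2 := by
  intro k
  induction k with
  | zero =>
    intro i T res l r p c hk hrank hlr hr hp hc hb hco
    have hg : ¬ (l < i ∧ i ≤ r) := by omega
    rw [pvLoopA, pvGloop]
    rw [dif_neg hg, dif_neg (by omega : ¬ (l < i ∧ i ≤ r ∧ p < 20))]
    exact ⟨rfl, hb, hco⟩
  | succ k ih =>
    intro i T res l r p c hk hrank hlr hr hp hc hb hco
    by_cases hg : l < i ∧ i ≤ r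
    · rw [pvLoopA, pvGloop, dif_pos hg, dif_pos ⟨hg.1, hg.2, hp⟩]
      have hch : (((pvSA N words).getD (i-1) []).getD p 96) = pvCodeB words i p :=
        pvS_access N words i p (by omega) (by omega)
      rw [hch]
      by_cases hbrk : (if pvCodeB words i p ≠ 63 then pvCodeB words i p ≠ 96 + (c : Int)
          else c = 0)
      · rw [if_pos hbrk, if_pos hbrk]
        exact ⟨rfl, hb, hco⟩
      · rw [if_neg hbrk, if_neg hbrk]
        have ha := hdfs T l i (p+1) 0
          (by simp only [pvRank] at *; omega) (by omega) (by omega) (by omega) (by omega) hb hco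
        have hbres := hdfs (pvDfsA (pvSA N words) fuel T l i (p+1) 0).2 i r p (c+1)
          (by simp only [pvRank] at *; omega) (by omega) (by omega) (by omega) (by omega)
          ha.2.1 ha.2.2
        have hrec := ih (i+1)
          (pvDfsA (pvSA N words) fuel (pvDfsA (pvSA N words) fuel T l i (p+1) 0).2 i r p (c+1)).2
          (res + PySem.Int.mod
            (pvG (pvCodeB words) l i (p+1) 0 * pvG (pvCodeB words) i r p (c+1)) 1000000007)
          l r p c (by omega) hrank hlr hr hp hc hbres.2.1 hbres.2.2
        simp only [ha.1, hbres.1]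
        exact hrec
    · rw [pvLoopA, pvGloop, dif_neg hg, dif_neg (by omega : ¬ (l < i ∧ i ≤ r ∧ p < 20))]
      exact ⟨rfl, hb, hco⟩

theorem pvDfsA_correct (N : Nat) (words : List String) : ∀ fuel, pvAOK N words fuel := by
  intro fuel
  induction fuel with
  | zero => intro T l r p c hrank; omega
  | succ fuel ih =>
    intro T l r p c hrank hlr hr hp hc hb hco
    rw [pvDfsA]
    cases hget : T.get? ((l : Int), (r : Int), (p : Int), (c : Int)) with
    | some v =>
      simp only
      exact ⟨hco l r p c v hget, hb, hco⟩
    | none =>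
      simp only
      have hnb : ¬ (l = r ∨ p = 20 ∨ c = 27) := by
        intro hbase
        have := hb l r p c hlr hr hp hc hbase
        simp only [pvKey] at this
        rw [hget] at this
        simp at this
      have hlr' : l < r := by omega
      have hp' : p < 20 := by omega
      have hc' : c < 27 := by omega
      have hrt := ih T l r p (c+1)
        (by simp only [pvRank] at *; omega) (by omega) hr hp (by omega) hb hco
      have hlt := pvLoopA_correct N words fuel ih (r + 1 - (l+1)) (l+1)
        (pvDfsA (pvSA N words) fuel T l r p (c+1)).2
        (pvDfsA (pvSA N words) fuel T l r p (c+1)).1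
        l r p c rfl (by omega) hlr' hr hp' hc' hrt.2.1 hrt.2.2
      have hval : PySem.Int.mod
          (pvLoopA (pvSA N words) fuel (pvDfsA (pvSA N words) fuel T l r p (c+1)).2
            l r p c (l+1) (pvDfsA (pvSA N words) fuel T l r p (c+1)).1).1 1000000007
          = pvG (pvCodeB words) l r p c := by
        rw [hlt.1, hrt.1, ← pvG_step (pvCodeB words) l r p c (by omega) hp' hc']
      refine ⟨hval, ?_, ?_⟩
      · rw [hval]
        exact pvHbase_insert N words _ l r p c _ hlt.2.1 hnb
      · rw [hval]
        exact pvHcorr_insert words _ l r p c hlt.2.2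

-- ---------- B side: table states hold the g-values ----------
def pvCorr (words : List String) (T : PySem.Dict (Int × Int × Int × Int) Int)
    (l r p c : Nat) : Prop :=
  T.get? (pvKey l r p c) = some (pvG (pvCodeB words) l r p c)

theorem pvCorr_insert (words : List String) (T : PySem.Dict (Int × Int × Int × Int) Int)
    (l r p c l' r' p' c' : Nat) (h : pvCorr words T l' r' p' c') :
    pvCorr words (T.insert (pvKey l r p c) (pvG (pvCodeB words) l r p c)) l' r' p' c' := by
  unfold pvCorr at h ⊢
  rw [PySem.Dict.get?_insert]
  by_cases hk : pvKey l' r' p' c' = pvKey l r p c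
  · obtain ⟨rfl, rfl, rfl, rfl⟩ := (pvKey_eq_iff l' r' p' c' l r p c).1 hk
    rw [if_pos rfl]
  · rw [if_neg hk]; exact h

theorem pvCorr_insert_self (words : List String) (T : PySem.Dict (Int × Int × Int × Int) Int)
    (l r p c : Nat) :
    pvCorr words (T.insert (pvKey l r p c) (pvG (pvCodeB words) l r p c)) l r p c := by
  unfold pvCorr
  rw [PySem.Dict.get?_insert, if_pos rfl]

theorem pvLookupB_eq (words : List String) (T : PySem.Dict (Int × Int × Int × Int) Int)
    (l r p c : Nat) (hlr : l ≤ r) (hp : p ≤ 20) (hc : c ≤ 27)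
    (hco : l < r → p < 20 → c < 27 → pvCorr words T l r p c) :
    pvLookupB T l r p c = pvG (pvCodeB words) l r p c := by
  unfold pvLookupB
  by_cases h1 : l = r
  · rw [if_pos h1, pvG_diag _ _ _ _ _ h1]
  · rw [if_neg h1]
    by_cases h2 : p = 20
    · rw [if_pos h2, pvG_row _ _ _ _ _ h1 (by omega)]
    · rw [if_neg h2]
      by_cases h3 : c = 27
      · rw [if_pos h3, pvG_col _ _ _ _ _ h1 (by omega) (by omega)]
      · rw [if_neg h3]
        have hcc := hco (by omega) (by omega) (by omega)
        unfold pvCorr at hcc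
        simp only [pvKey] at hcc
        rw [hcc]
        rfl

theorem pvInnerB_eq (words : List String) (T : PySem.Dict (Int × Int × Int × Int) Int)
    (l r p c : Nat) (hp : p < 20)
    (H1 : ∀ i, l < i → i ≤ r → pvLookupB T l i (p+1) 0 = pvG (pvCodeB words) l i (p+1) 0)
    (H2 : ∀ i, l < i → i ≤ r → pvLookupB T i r p (c+1) = pvG (pvCodeB words) i r p (c+1)) :
    ∀ (k i : Nat) (res : Int), r + 1 - i = k →
      pvInnerB words T l r p c i res = pvGloop (pvCodeB words) l r p c i res := by
  intro k
  induction k with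
  | zero =>
    intro i res hk
    rw [pvInnerB, pvGloop, dif_neg (by omega : ¬ (l < i ∧ i ≤ r)),
      dif_neg (by omega : ¬ (l < i ∧ i ≤ r ∧ p < 20))]
  | succ k ih =>
    intro i res hk
    by_cases hg : l < i ∧ i ≤ r
    · rw [pvInnerB, pvGloop, dif_pos hg, dif_pos ⟨hg.1, hg.2, hp⟩]
      by_cases hbrk : (if pvCodeB words i p ≠ 63 then pvCodeB words i p ≠ 96 + (c : Int)
          else c = 0)
      · rw [if_pos hbrk, if_pos hbrk]
      · rw [if_neg hbrk, if_neg hbrk, H1 i hg.1 hg.2, H2 i hg.1 hg.2]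
        exact ih (i+1) _ (by omega)
    · rw [pvInnerB, pvGloop, dif_neg hg, dif_neg (by omega : ¬ (l < i ∧ i ≤ r ∧ p < 20))]

theorem pvFillC_spec (N : Nat) (words : List String) (l r p : Nat)
    (hlr : l < r) (hr : r ≤ N) (hp : p < 20) :
    ∀ c, c ≤ 26 → ∀ T : PySem.Dict (Int × Int × Int × Int) Int,
    (∀ l' r' p' c', l' < r' → r' ≤ N → p' < 20 → c' < 27 →
        (r' - l' < r - l ∨ (l' = l ∧ r' = r ∧ p < p')) → pvCorr words T l' r' p' c') →
    (∀ c', c < c' → c' ≤ 26 → pvCorr words T l r p c') →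
    (∀ l' r' p' c', pvCorr words T l' r' p' c' →
        pvCorr words (pvFillC words T l r p c) l' r' p' c')
    ∧ (∀ c', c' ≤ 26 → pvCorr words (pvFillC words T l r p c) l r p c') := by
  have step : ∀ c, c ≤ 26 → ∀ T : PySem.Dict (Int × Int × Int × Int) Int,
      (∀ l' r' p' c', l' < r' → r' ≤ N → p' < 20 → c' < 27 →
          (r' - l' < r - l ∨ (l' = l ∧ r' = r ∧ p < p')) → pvCorr words T l' r' p' c') →
      (∀ c', c < c' → c' ≤ 26 → pvCorr words T l r p c') →
      PySem.Int.mod (pvInnerB words T l r p c (l+1) (pvLookupB T l r p (c+1))) 1000000007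
        = pvG (pvCodeB words) l r p c := by
    intro c hc T Hsub Hc
    have h0 : pvLookupB T l r p (c+1) = pvG (pvCodeB words) l r p (c+1) := by
      refine pvLookupB_eq words T l r p (c+1) (by omega) (by omega) (by omega) ?_
      intro _ _ hcc
      exact Hc (c+1) (by omega) (by omega)
    have H1 : ∀ i, l < i → i ≤ r →
        pvLookupB T l i (p+1) 0 = pvG (pvCodeB words) l i (p+1) 0 := by
      intro i hi1 hi2
      refine pvLookupB_eq words T l i (p+1) 0 (by omega) (by omega) (by omega) ?_
      intro hli hpp _
      by_cases hir : i = r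
      · subst hir
        exact Hsub l i (p+1) 0 hli hr hpp (by omega) (Or.inr ⟨rfl, rfl, by omega⟩)
      · exact Hsub l i (p+1) 0 hli (by omega) hpp (by omega) (Or.inl (by omega))
    have H2 : ∀ i, l < i → i ≤ r →
        pvLookupB T i r p (c+1) = pvG (pvCodeB words) i r p (c+1) := by
      intro i hi1 hi2
      refine pvLookupB_eq words T i r p (c+1) (by omega) (by omega) (by omega) ?_
      intro hir _ hcc
      exact Hsub i r p (c+1) hir hr hp (by omega) (Or.inl (by omega))
    rw [pvInnerB_eq words T l r p c hp H1 H2 (r + 1 - (l+1)) (l+1) _ rfl, h0,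
      ← pvG_step (pvCodeB words) l r p c (by omega) hp (by omega)]
  intro c
  induction c with
  | zero =>
    intro hc T Hsub Hc
    rw [pvFillC, if_pos rfl]
    have hres := step 0 (by omega) T Hsub Hc
    rw [hres]
    constructor
    · intro l' r' p' c' h
      exact pvCorr_insert words T l r p 0 l' r' p' c' h
    · intro c' hc'
      by_cases h0 : c' = 0
      · subst h0; exact pvCorr_insert_self words T l r p 0
      · exact pvCorr_insert words T l r p 0 l r p c' (Hc c' (by omega) hc')
  | succ c ih =>
    intro hc T Hsub Hc
    rw [pvFillC]
    rw [if_neg (Nat.succ_ne_zero c)]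
    have hres := step (c+1) hc T Hsub Hc
    rw [hres]
    have hih := ih (by omega)
      (T.insert (pvKey l r p (c+1)) (pvG (pvCodeB words) l r p (c+1)))
      (fun l' r' p' c' h1 h2 h3 h4 h5 =>
        pvCorr_insert words T l r p (c+1) l' r' p' c' (Hsub l' r' p' c' h1 h2 h3 h4 h5))
      (fun c' hc1 hc2 => by
        by_cases he : c' = c + 1
        · rw [he]; exact pvCorr_insert_self words T l r p (c+1)
        · exact pvCorr_insert words T l r p (c+1) l r p c' (Hc c' (by omega) hc2))
    simp only [Nat.add_sub_cancel]
    constructor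
    · intro l' r' p' c' h
      exact hih.1 l' r' p' c' (pvCorr_insert words T l r p (c+1) l' r' p' c' h)
    · exact hih.2

theorem pvFillP_spec (N : Nat) (words : List String) (l r : Nat)
    (hlr : l < r) (hr : r ≤ N) :
    ∀ p, p ≤ 19 → ∀ T : PySem.Dict (Int × Int × Int × Int) Int,
    (∀ l' r' p' c', l' < r' → r' ≤ N → p' < 20 → c' < 27 → r' - l' < r - l →
        pvCorr words T l' r' p' c') →
    (∀ p', p < p' → p' ≤ 19 → ∀ c', c' ≤ 26 → pvCorr words T l r p' c') →
    (∀ l' r' p' c', pvCorr words T l' r' p' c' →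
        pvCorr words (pvFillP words T l r p) l' r' p' c')
    ∧ (∀ p', p' ≤ 19 → ∀ c', c' ≤ 26 → pvCorr words (pvFillP words T l r p) l r p' c') := by
  intro p
  induction p with
  | zero =>
    intro hp T Hsmall Hp
    rw [pvFillP, if_pos rfl]
    have hfc := pvFillC_spec N words l r 0 hlr hr (by omega) 26 (by omega) T
      (fun l' r' p' c' h1 h2 h3 h4 h5 => by
        rcases h5 with h5 | ⟨rfl, rfl, h5⟩
        · exact Hsmall l' r' p' c' h1 h2 h3 h4 h5
        · exact Hp p' h5 (by omega) c' (by omega))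
      (fun c' hc1 hc2 => absurd hc1 (by omega))
    constructor
    · exact hfc.1
    · intro p' hp' c' hc'
      by_cases h0 : p' = 0
      · subst h0; exact hfc.2 c' hc'
      · exact hfc.1 l r p' c' (Hp p' (by omega) hp' c' hc')
  | succ p ih =>
    intro hp T Hsmall Hp
    rw [pvFillP]
    rw [if_neg (Nat.succ_ne_zero p)]
    have hfc := pvFillC_spec N words l r (p+1) hlr hr (by omega) 26 (by omega) T
      (fun l' r' p' c' h1 h2 h3 h4 h5 => by
        rcases h5 with h5 | ⟨rfl, rfl, h5⟩
        · exact Hsmall l' r' p' c' h1 h2 h3 h4 h5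
        · exact Hp p' h5 (by omega) c' (by omega))
      (fun c' hc1 hc2 => absurd hc1 (by omega))
    have hih := ih (by omega) (pvFillC words T l r (p+1) 26)
      (fun l' r' p' c' h1 h2 h3 h4 h5 =>
        hfc.1 l' r' p' c' (Hsmall l' r' p' c' h1 h2 h3 h4 h5))
      (fun p' hp1 hp2 c' hc' => by
        by_cases he : p' = p + 1
        · subst he; exact hfc.2 c' hc'
        · exact hfc.1 l r p' c' (Hp p' (by omega) hp2 c' hc'))
    simp only [Nat.add_sub_cancel]
    constructor
    · intro l' r' p' c' h
      exact hih.1 l' r' p' c' (hfc.1 l' r' p' c' h)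
    · exact hih.2

theorem pvFillL_spec (N : Nat) (words : List String) (d : Nat) (hd : 1 ≤ d) :
    ∀ (k l stop : Nat) (T : PySem.Dict (Int × Int × Int × Int) Int), stop - l = k →
    stop + d ≤ N + 1 →
    (∀ l' r' p' c', l' < r' → r' ≤ N → p' < 20 → c' < 27 → r' - l' < d →
        pvCorr words T l' r' p' c') →
    (∀ l' r' p' c', pvCorr words T l' r' p' c' →
        pvCorr words (pvFillL words T d l stop) l' r' p' c')
    ∧ (∀ l', l ≤ l' → l' < stop → ∀ p', p' ≤ 19 → ∀ c', c' ≤ 26 →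
        pvCorr words (pvFillL words T d l stop) l' (l'+d) p' c') := by
  intro k
  induction k with
  | zero =>
    intro l stop T hk hstop Hsmall
    rw [pvFillL, dif_neg (by omega : ¬ l < stop)]
    exact ⟨fun l' r' p' c' h => h, fun l' h1 h2 => absurd h2 (by omega)⟩
  | succ k ih =>
    intro l stop T hk hstop Hsmall
    have hls : l < stop := by omega
    rw [pvFillL, dif_pos hls]
    have hfp := pvFillP_spec N words l (l+d) (by omega) (by omega) 19 (le_refl 19) T
      (fun l' r' p' c' h1 h2 h3 h4 h5 =>
        Hsmall l' r' p' c' h1 h2 h3 h4 (by omega))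
      (fun p' hp1 hp2 => absurd hp1 (by omega))
    have hih := ih (l+1) stop (pvFillP words T l (l+d) 19) (by omega) hstop
      (fun l' r' p' c' h1 h2 h3 h4 h5 =>
        hfp.1 l' r' p' c' (Hsmall l' r' p' c' h1 h2 h3 h4 h5))
    constructor
    · intro l' r' p' c' h
      exact hih.1 l' r' p' c' (hfp.1 l' r' p' c' h)
    · intro l' h1 h2 p' hp' c' hc'
      by_cases he : l' = l
      · subst he
        exact hih.1 l' (l'+d) p' c' (hfp.2 p' hp' c' hc')
      · exact hih.2 l' (by omega) h2 p' hp' c' hc'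

theorem pvFillD_spec (N : Nat) (words : List String) :
    ∀ (k d : Nat) (T : PySem.Dict (Int × Int × Int × Int) Int), N + 1 - d = k → 1 ≤ d →
    (∀ l' r' p' c', l' < r' → r' ≤ N → p' < 20 → c' < 27 → r' - l' < d →
        pvCorr words T l' r' p' c') →
    ∀ l' r' p' c', l' < r' → r' ≤ N → p' < 20 → c' < 27 →
      pvCorr words (pvFillD words T d N) l' r' p' c' := by
  intro k
  induction k with
  | zero =>
    intro d T hk hd Hsmall l' r' p' c' h1 h2 h3 h4
    rw [pvFillD, dif_neg (by omega : ¬ d ≤ N)]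
    exact Hsmall l' r' p' c' h1 h2 h3 h4 (by omega)
  | succ k ih =>
    intro d T hk hd Hsmall l' r' p' c' h1 h2 h3 h4
    have hdN : d ≤ N := by omega
    rw [pvFillD, dif_pos hdN]
    have hfl := pvFillL_spec N words d hd (N + 1 - d) 0 (N + 1 - d) T rfl (by omega) Hsmall
    refine ih (d+1) (pvFillL words T d 0 (N + 1 - d)) (by omega) (by omega) ?_ l' r' p' c' h1 h2 h3 h4
    intro a b pp cc g1 g2 g3 g4 g5
    by_cases he : b - a < d
    · exact hfl.1 a b pp cc (Hsmall a b pp cc g1 g2 g3 g4 he)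
    · have hba : b = a + d := by omega
      subst hba
      exact hfl.2 a (by omega) (by omega) pp (by omega) cc (by omega)

theorem count_restoration_ways_spec : Claim_equal_count_restoration_ways := by
  unfold Claim_equal_count_restoration_ways
  intro n words _ _
  unfold Spec_count_restoration_ways
  show (pvDfsA (pvSA n.toNat words) (588 * n.toNat + 588) (pvBaseA n.toNat) 0 n.toNat 0 0).1
      = pvLookupB (pvFillD words PySem.Dict.empty 1 n.toNat) 0 n.toNat 0 0
  have hA := (pvDfsA_correct n.toNat words (588 * n.toNat + 588)) (pvBaseA n.toNat)
      0 n.toNat 0 0 (by simp only [pvRank]; omega) (by omega) (le_refl _) (by omega) (by omega)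
      (pvBaseA_Hbase n.toNat words) (pvBaseA_Hcorr n.toNat words)
  rw [hA.1]
  have hBdone := pvFillD_spec n.toNat words (n.toNat + 1 - 1) 1 PySem.Dict.empty rfl
      (le_refl 1) (fun l' r' p' c' h1 h2 h3 h4 h5 => absurd h1 (by omega))
  have hB := pvLookupB_eq words (pvFillD words PySem.Dict.empty 1 n.toNat) 0 n.toNat 0 0
      (by omega) (by omega) (by omega)
      (fun h1 h2 h3 => hBdone 0 n.toNat 0 0 h1 (le_refl _) h2 h3)
  rw [hB]
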